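-- pv_equiv track=rewrite | github.com/mathorlee/leetcode-clt | acs/minimum-operations-to-make-the-array-k-increasing.py | calculate_cuts
-- ===== SOURCE A (Python) =====
-- def calculate_cuts(arr: list[int], k: int) -> int:
--     # begin
--     from bisect import bisect_right
--
--     n = len(arr)
--     res = 0
--     for i in range(k):
--         values = []
--         cnt = 0
--         for j in range(i, n, k):
--             cnt += 1
--             v = arr[j]
--             index = bisect_right(values, v)
--             if index < len(values):
--                 values[index] = min(values[index], v)
--             else:
--                 values.append(v)
--         res += cnt - len(values)
--     return res
-- ===== SOURCE B (Python) =====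
-- def calculate_cuts(arr: list[int], k: int) -> int:
--     # Quadratic DP: for each strided class, length of the longest non-decreasing
--     # subsequence computed as dp over (value, best-length-ending-here) pairs.
--     n = len(arr)
--     total = 0
--     for i in range(k):
--         sub = [arr[j] for j in range(i, n, k)]
--         dp = []  # pairs (value, length of longest non-decreasing subsequence ending there)
--         for v in sub:
--             best = 0
--             for (u, d) in dp:
--                 if u <= v and best < d:
--                     best = d
--             dp.append((v, best + 1))
--         longest = 0
--         for (_, d) in dp:
--             if longest < d:
--                 longest = d
--         total += len(sub) - longest
--     return total
-- ===== Notes on version B (the rewrite author's own statement) =====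
-- stated objective: alternative
-- what changed: A computes each strided class's longest non-decreasing subsequence by patience sorting with bisect_right on a list of pile tails; B computes the same length with an explicit quadratic DP over (value, best-length-ending-here) pairs and a running maximum.
import Mathlib
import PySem

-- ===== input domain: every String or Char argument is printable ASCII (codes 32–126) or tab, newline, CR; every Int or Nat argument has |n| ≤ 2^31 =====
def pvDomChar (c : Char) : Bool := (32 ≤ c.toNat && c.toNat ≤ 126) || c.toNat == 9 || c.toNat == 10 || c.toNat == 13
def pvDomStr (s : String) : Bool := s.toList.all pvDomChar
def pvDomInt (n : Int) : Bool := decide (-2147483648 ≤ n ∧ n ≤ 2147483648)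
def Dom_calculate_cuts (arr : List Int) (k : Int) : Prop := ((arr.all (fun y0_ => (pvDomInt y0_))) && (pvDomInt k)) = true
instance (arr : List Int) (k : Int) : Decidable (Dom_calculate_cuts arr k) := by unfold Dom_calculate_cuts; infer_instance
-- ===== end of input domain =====

-- B replaces A's patience-sorting (bisect) computation of each strided class's longest
-- non-decreasing subsequence by an explicit quadratic DP over (value, best-length) pairs:
-- a different algorithm for the same quantity ("alternative", no speed claim).


-- ===== PORT A =====
-- literal transliteration of A: outer loop over range(k); inner loop over range(i, n, k)
-- carrying (values, cnt); bisect_right is PySem.List.bisectRight; arr[j] is pyGetD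
-- (j is always in range here, so the default is never read).
def calculate_cuts (arr : List Int) (k : Int) : Int :=
  (PySem.List.pyRange 0 k 1).foldl (fun res i =>
    let s := (PySem.List.pyRange i (arr.length : Int) k).foldl
      (fun (s : List Int × Int) j =>
        let v := PySem.List.pyGetD arr j 0
        let index := PySem.List.bisectRight s.1 v
        (if index < s.1.length then s.1.set index (min (s.1.getD index 0) v)
         else s.1 ++ [v],
         s.2 + 1)) ([], 0)
    res + (s.2 - (s.1.length : Int))) 0

-- ===== PORT B =====
-- transliteration of Source B: collect each strided class, run the O(m^2) DP over pairs
-- (value, longest non-decreasing subsequence length ending there), take the running max.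
def calculate_cuts_alt (arr : List Int) (k : Int) : Int :=
  (PySem.List.pyRange 0 k 1).foldl (fun total i =>
    let sub := (PySem.List.pyRange i (arr.length : Int) k).map
      (fun j => PySem.List.pyGetD arr j 0)
    let dp := sub.foldl (fun (dp : List (Int × Int)) v =>
      let best := dp.foldl (fun b p => if p.1 ≤ v ∧ b < p.2 then p.2 else b) 0
      dp ++ [(v, best + 1)]) []
    let longest := dp.foldl (fun L p => if L < p.2 then p.2 else L) 0
    total + ((sub.length : Int) - longest)) 0

-- ===== PRECONDITION & SPEC =====
def Spec_calculate_cuts (arr : List Int) (k : Int) (out : Int) : Prop := out = calculate_cuts_alt arr k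
instance (arr : List Int) (k : Int) (out : Int) : Decidable (Spec_calculate_cuts arr k out) := by unfold Spec_calculate_cuts; infer_instance

-- ===== CLAIM (what is proved, stated in full; the proofs are below) =====
def Claim_equal_calculate_cuts : Prop := ∀ (arr : List Int) (k : Int), Dom_calculate_cuts arr k → Spec_calculate_cuts arr k (calculate_cuts arr k)

-- ===== LEMMAS AND PROOFS =====


def pstepA (values : List Int) (v : Int) : List Int :=
  if PySem.List.bisectRight values v < values.length then
    values.set (PySem.List.bisectRight values v)
      (min (values.getD (PySem.List.bisectRight values v) 0) v)
  else values ++ [v]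

def dstep (dp : List (Int × Int)) (v : Int) : List (Int × Int) :=
  dp ++ [(v, (dp.foldl (fun b p => if p.1 ≤ v ∧ b < p.2 then p.2 else b) 0) + 1)]

def PInv (dp : List (Int × Int)) (values : List Int) : Prop :=
  values.Pairwise (· ≤ ·) ∧
  (∀ p ∈ dp, 1 ≤ p.2 ∧ p.2 ≤ (values.length : Int)) ∧
  (∀ j : Nat, j < values.length →
      (∃ p ∈ dp, p.2 = (j : Int) + 1 ∧ p.1 = values.getD j 0) ∧
      (∀ p ∈ dp, p.2 = (j : Int) + 1 → values.getD j 0 ≤ p.1))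

theorem best_ge_init (v : Int) (dp : List (Int × Int)) (b : Int) :
    b ≤ dp.foldl (fun b p => if p.1 ≤ v ∧ b < p.2 then p.2 else b) b := by
  induction dp generalizing b with
  | nil => simp
  | cons q t ih =>
    simp only [List.foldl_cons]
    split_ifs with h
    · exact le_trans (le_of_lt h.2) (ih _)
    · exact ih _

theorem best_ge_mem (v : Int) (dp : List (Int × Int)) (b : Int) (p : Int × Int)
    (hp : p ∈ dp) (hle : p.1 ≤ v) :
    p.2 ≤ dp.foldl (fun b p => if p.1 ≤ v ∧ b < p.2 then p.2 else b) b := by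
  induction dp generalizing b with
  | nil => simp at hp
  | cons q t ih =>
    simp only [List.foldl_cons]
    rcases List.mem_cons.mp hp with h | h
    · subst h
      split_ifs with hq
      · exact best_ge_init v t p.2
      · have : p.2 ≤ b := by
          rcases not_and_or.mp hq with h1 | h1
          · exact absurd hle h1
          · omega
        exact le_trans this (best_ge_init v t b)
    · exact ih _ h

theorem best_le (v : Int) (dp : List (Int × Int)) (b c : Int)
    (hb : b ≤ c) (h : ∀ p ∈ dp, p.1 ≤ v → p.2 ≤ c) :
    dp.foldl (fun b p => if p.1 ≤ v ∧ b < p.2 then p.2 else b) b ≤ c := by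
  induction dp generalizing b with
  | nil => simpa
  | cons q t ih =>
    simp only [List.foldl_cons]
    split_ifs with hq
    · exact ih _ (h q List.mem_cons_self hq.1) (fun p hp => h p (List.mem_cons_of_mem _ hp))
    · exact ih _ hb (fun p hp => h p (List.mem_cons_of_mem _ hp))

theorem inv_step (dp : List (Int × Int)) (values : List Int) (v : Int)
    (h : PInv dp values) : PInv (dstep dp v) (pstepA values v) := by
  obtain ⟨hsort, hbnd, hcls⟩ := h
  obtain ⟨hle, hlt_le, hge_gt⟩ := PySem.List.bisectRight_spec values v hsort
  have hbest : dp.foldl (fun b p => if p.1 ≤ v ∧ b < p.2 then p.2 else b) 0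
      = (PySem.List.bisectRight values v : Int) := by
    apply le_antisymm
    · apply best_le v dp 0 _ (by positivity)
      intro p hp hpv
      obtain ⟨h1, h2⟩ := hbnd p hp
      have hjm : (p.2 - 1).toNat < values.length := by omega
      have hminp := (hcls (p.2 - 1).toNat hjm).2 p hp (by omega)
      rw [List.getD_eq_getElem values 0 hjm] at hminp
      by_contra hgt
      have hij : PySem.List.bisectRight values v ≤ (p.2 - 1).toNat := by omega
      have := hge_gt (p.2 - 1).toNat hjm hij
      omega
    · rcases Nat.eq_zero_or_pos (PySem.List.bisectRight values v) with h0 | h0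
      · rw [h0]; exact_mod_cast best_ge_init v dp 0
      · have hjm : PySem.List.bisectRight values v - 1 < values.length := by omega
        obtain ⟨p, hp, hp2, hp1⟩ := (hcls (PySem.List.bisectRight values v - 1) hjm).1
        have hpv : p.1 ≤ v := by
          rw [hp1, List.getD_eq_getElem values 0 hjm]
          exact hlt_le _ hjm (by omega)
        have := best_ge_mem v dp 0 p hp hpv
        rw [hp2] at this
        omega
  unfold dstep pstepA
  rw [hbest]
  by_cases hcase : PySem.List.bisectRight values v < values.length
  · -- replace: values.set idx v
    have hvlt : v < values[PySem.List.bisectRight values v]'hcase := hge_gt _ hcase le_rfl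
    have hmin : min (values.getD (PySem.List.bisectRight values v) 0) v = v := by
      rw [List.getD_eq_getElem values 0 hcase]; omega
    rw [if_pos hcase, hmin]
    have hgd : ∀ (j : Nat), j < values.length →
        (values.set (PySem.List.bisectRight values v) v).getD j 0
          = if PySem.List.bisectRight values v = j then v else values.getD j 0 := by
      intro j hj
      rw [List.getD_eq_getElem _ 0 (by simpa using hj), List.getElem_set]
      split_ifs with hij
      · rfl
      · rw [List.getD_eq_getElem values 0 hj]
    refine ⟨?_, ?_, ?_⟩
    · rw [List.pairwise_iff_getElem]
      intro a b ha hb hab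
      simp only [List.getElem_set]
      simp only [List.length_set] at ha hb
      split_ifs with h1 h2
      · exact le_rfl
      · -- a = idx < b : v ≤ values[b]
        exact le_of_lt (hge_gt b hb (by omega))
      · -- b = idx, a < idx
        exact hlt_le a ha (by omega)
      · exact (List.pairwise_iff_getElem.mp hsort) a b (by omega) (by omega) hab
    · intro p hp
      rcases List.mem_append.mp hp with hp | hp
      · have := hbnd p hp
        simpa [List.length_set] using this
      · simp at hp
        subst hp
        simp [List.length_set]
        omega
    · intro j hj
      simp only [List.length_set] at hj
      rw [hgd j hj]
      constructor
      · by_cases hij : PySem.List.bisectRight values v = j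
        · refine ⟨(v, (PySem.List.bisectRight values v : Int) + 1), by simp, by push_cast; omega, by simp [hij]⟩
        · obtain ⟨p, hp, hp2, hp1⟩ := (hcls j hj).1
          exact ⟨p, List.mem_append_left _ hp, hp2, by simp [hij, hp1]⟩
      · intro p hp hp2
        rcases List.mem_append.mp hp with hp | hp
        · by_cases hij : PySem.List.bisectRight values v = j
          · have hold := (hcls j hj).2 p hp hp2
            rw [if_pos hij]
            subst hij
            rw [List.getD_eq_getElem values 0 hcase] at hold
            omega
          · rw [if_neg hij]
            exact (hcls j hj).2 p hp hp2
        · simp at hp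
          subst hp
          simp only at hp2
          have hij : PySem.List.bisectRight values v = j := by omega
          rw [if_pos hij]
  · -- append case: idx = len
    have hidx : PySem.List.bisectRight values v = values.length := by omega
    rw [if_neg hcase]
    have hgd : ∀ (j : Nat), j < values.length →
        (values ++ [v]).getD j 0 = values.getD j 0 := by
      intro j hj
      rw [List.getD_eq_getElem _ 0 (by simp; omega), List.getElem_append_left hj,
        List.getD_eq_getElem values 0 hj]
    have hgdm : (values ++ [v]).getD values.length 0 = v := by
      rw [List.getD_eq_getElem _ 0 (by simp)]
      simp
    refine ⟨?_, ?_, ?_⟩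
    · rw [List.pairwise_append]
      refine ⟨hsort, by simp, ?_⟩
      intro a ha b hb
      simp at hb; subst hb
      obtain ⟨j, hj, rfl⟩ := List.mem_iff_getElem.mp ha
      exact hlt_le j hj (by omega)
    · intro p hp
      rcases List.mem_append.mp hp with hp | hp
      · have := hbnd p hp
        simp only [List.length_append, List.length_cons, List.length_nil]
        push_cast
        omega
      · simp at hp
        subst hp
        simp only [List.length_append, List.length_cons, List.length_nil]
        push_cast
        omega
    · intro j hj
      simp only [List.length_append, List.length_cons, List.length_nil] at hj
      by_cases hjm : j < values.length
      · rw [hgd j hjm]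
        constructor
        · obtain ⟨p, hp, hp2, hp1⟩ := (hcls j hjm).1
          exact ⟨p, List.mem_append_left _ hp, hp2, hp1⟩
        · intro p hp hp2
          rcases List.mem_append.mp hp with hp | hp
          · exact (hcls j hjm).2 p hp hp2
          · simp at hp
            subst hp
            simp only at hp2
            rw [hidx] at hp2
            omega
      · have hjeq : j = values.length := by omega
        subst hjeq
        rw [hgdm]
        constructor
        · exact ⟨(v, (PySem.List.bisectRight values v : Int) + 1), by simp, by rw [hidx], rfl⟩
        · intro p hp hp2
          rcases List.mem_append.mp hp with hp | hp
          · have := hbnd p hp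
            omega
          · simp at hp
            subst hp
            exact le_rfl


def longestOf (dp : List (Int × Int)) : Int :=
  dp.foldl (fun L p => if L < p.2 then p.2 else L) 0

theorem longest_ge_init (dp : List (Int × Int)) (b : Int) :
    b ≤ dp.foldl (fun L p => if L < p.2 then p.2 else L) b := by
  induction dp generalizing b with
  | nil => simp
  | cons q t ih =>
    simp only [List.foldl_cons]
    split_ifs with h
    · exact le_trans (le_of_lt h) (ih _)
    · exact ih _

theorem longest_ge_mem (dp : List (Int × Int)) (b : Int) (p : Int × Int) (hp : p ∈ dp) :
    p.2 ≤ dp.foldl (fun L p => if L < p.2 then p.2 else L) b := by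
  induction dp generalizing b with
  | nil => simp at hp
  | cons q t ih =>
    simp only [List.foldl_cons]
    rcases List.mem_cons.mp hp with h | h
    · subst h
      split_ifs with hq
      · exact longest_ge_init t p.2
      · exact le_trans (by omega) (longest_ge_init t b)
    · exact ih _ h

theorem longest_le (dp : List (Int × Int)) (b c : Int)
    (hb : b ≤ c) (h : ∀ p ∈ dp, p.2 ≤ c) :
    dp.foldl (fun L p => if L < p.2 then p.2 else L) b ≤ c := by
  induction dp generalizing b with
  | nil => simpa
  | cons q t ih =>
    simp only [List.foldl_cons]
    split_ifs with hq
    · exact ih _ (h q List.mem_cons_self) (fun p hp => h p (List.mem_cons_of_mem _ hp))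
    · exact ih _ hb (fun p hp => h p (List.mem_cons_of_mem _ hp))

theorem inv_fold (xs : List Int) (dp : List (Int × Int)) (values : List Int)
    (h : PInv dp values) : PInv (xs.foldl dstep dp) (xs.foldl pstepA values) := by
  induction xs generalizing dp values with
  | nil => exact h
  | cons x xs ih => exact ih _ _ (inv_step _ _ _ h)

theorem inv_longest (dp : List (Int × Int)) (values : List Int) (h : PInv dp values) :
    longestOf dp = (values.length : Int) := by
  obtain ⟨_, hbnd, hcls⟩ := h
  unfold longestOf
  apply le_antisymm
  · exact longest_le dp 0 _ (by positivity) (fun p hp => (hbnd p hp).2)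
  · rcases Nat.eq_zero_or_pos values.length with h0 | h0
    · rw [h0]
      exact_mod_cast longest_ge_init dp 0
    · obtain ⟨p, hp, hp2, _⟩ := (hcls (values.length - 1) (by omega)).1
      have := longest_ge_mem dp 0 p hp
      rw [hp2] at this
      omega

-- per-class core: the number of patience piles equals the DP's longest length
theorem patience_eq_dp (xs : List Int) :
    ((xs.foldl pstepA []).length : Int) = longestOf (xs.foldl dstep []) := by
  have h := inv_fold xs [] [] ⟨List.Pairwise.nil, by simp, by simp⟩
  exact (inv_longest _ _ h).symm

theorem foldl_add_one {α : Type} (l : List α) (a : Int) :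
    l.foldl (fun c _ => c + 1) a = a + (l.length : Int) := by
  induction l generalizing a with
  | nil => simp
  | cons x t ih =>
    simp only [List.foldl_cons, List.length_cons, ih]
    push_cast
    ring

-- ===== VERDICT (by name: the statement is the Claim_ definition above) =====
theorem calculate_cuts_spec : Claim_equal_calculate_cuts := by
  intro arr k _
  unfold Spec_calculate_cuts calculate_cuts calculate_cuts_alt
  apply PySem.List.foldl_congr_mem
  intro res i _
  show res + (((PySem.List.pyRange i (arr.length : Int) k).foldl
        (fun (s : List Int × Int) j => (pstepA s.1 (PySem.List.pyGetD arr j 0), s.2 + 1))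
        ([], 0)).2 -
      (((PySem.List.pyRange i (arr.length : Int) k).foldl
        (fun (s : List Int × Int) j => (pstepA s.1 (PySem.List.pyGetD arr j 0), s.2 + 1))
        ([], 0)).1.length : Int))
    = res + (((((PySem.List.pyRange i (arr.length : Int) k).map
        (fun j => PySem.List.pyGetD arr j 0)).length : Int)) -
      longestOf (((PySem.List.pyRange i (arr.length : Int) k).map
        (fun j => PySem.List.pyGetD arr j 0)).foldl dstep []))
  rw [PySem.List.foldl_prod_mk (f := fun (vs : List Int) j => pstepA vs (PySem.List.pyGetD arr j 0))
      (g := fun (c : Int) _ => c + 1)]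
  dsimp only
  rw [foldl_add_one, ← List.foldl_map (f := fun j => PySem.List.pyGetD arr j 0) (g := pstepA), patience_eq_dp, List.length_map]
  ring
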